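-- pv_equiv track=rewrite | github.com/xnzvl/mSweeper | mSweeper_package/gui/contexts/__init__.py | adapt_coords
-- ===== SOURCE A (Python) =====
-- from typing import Dict, List, Tuple
--
-- ICON_PARTS = 13
--
-- def adapt_coords(
--         x: int,
--         y: int,
--         side: int,
--         shape: List[int],
--         flip_x: bool = False,
--         flip_y: bool = False
-- ) -> List[int]:
--     even = True
--     adapted_coords: List[int] = []
--
--     x0 = (0 if not flip_x else ICON_PARTS * side) + x + 1
--     y0 = (0 if not flip_y else ICON_PARTS * side) + y + 1
--
--     for coord in shape:
--         polarity = -1 if (even and flip_x) or (not even and flip_y) else 1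
--         adapted_coords.append(coord * side * polarity + (x0 if even else y0))
--
--         even = not even
--
--     return adapted_coords
-- ===== SOURCE B (Python) =====
-- ICON_PARTS = 13
--
-- def adapt_coords(x, y, side, shape, flip_x=False, flip_y=False):
--     pol_x = -1 if flip_x else 1
--     pol_y = -1 if flip_y else 1
--     x0 = (ICON_PARTS * side if flip_x else 0) + x + 1
--     y0 = (ICON_PARTS * side if flip_y else 0) + y + 1
--     xs = [c * side * pol_x + x0 for c in shape[0::2]]
--     ys = [c * side * pol_y + y0 for c in shape[1::2]]
--     out = []
--     for i in range(len(xs)):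
--         out.append(xs[i])
--         if i < len(ys):
--             out.append(ys[i])
--     return out
-- ===== Notes on version B (the rewrite author's own statement) =====
-- stated objective: alternative
-- what changed: Replaces A's single parity-toggling pass (even flag flipped each iteration) by two homogeneous passes over the even- and odd-index slices with fixed polarities, then an interleaving merge that keeps a trailing x-coordinate of an odd-length shape.
import Mathlib
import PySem

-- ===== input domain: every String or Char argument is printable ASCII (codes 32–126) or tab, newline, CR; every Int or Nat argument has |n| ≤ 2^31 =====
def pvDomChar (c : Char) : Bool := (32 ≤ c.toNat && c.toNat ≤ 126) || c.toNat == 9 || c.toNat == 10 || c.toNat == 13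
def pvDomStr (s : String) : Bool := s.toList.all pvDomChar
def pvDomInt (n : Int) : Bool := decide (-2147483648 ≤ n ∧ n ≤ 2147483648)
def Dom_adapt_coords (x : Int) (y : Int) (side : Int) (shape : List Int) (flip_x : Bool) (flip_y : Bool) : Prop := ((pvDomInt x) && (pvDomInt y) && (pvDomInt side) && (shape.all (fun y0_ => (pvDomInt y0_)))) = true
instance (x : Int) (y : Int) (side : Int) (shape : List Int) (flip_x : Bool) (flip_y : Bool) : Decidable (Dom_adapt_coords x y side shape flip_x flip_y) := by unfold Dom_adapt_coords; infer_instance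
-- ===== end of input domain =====

-- ===== PORT A =====
-- B change: two homogeneous passes over even/odd slices plus an interleaving merge, instead of A's parity-toggling single pass.
-- A's loop, transcribed: consumes `shape` one coord at a time carrying the `even` flag (append-to-acc rendered as cons of the result).
def adaptGoA (side x0 y0 : Int) (fx fy : Bool) : Bool → List Int → List Int
  | _, [] => []
  | even, c :: rest =>
    (c * side * (if (even && fx) || (!even && fy) then -1 else 1) + (if even then x0 else y0))
      :: adaptGoA side x0 y0 fx fy (!even) rest

def adapt_coords (x : Int) (y : Int) (side : Int) (shape : List Int) (flip_x : Bool) (flip_y : Bool) : List Int :=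
  let x0 := (if !flip_x then 0 else 13 * side) + x + 1
  let y0 := (if !flip_y then 0 else 13 * side) + y + 1
  adaptGoA side x0 y0 flip_x flip_y true shape

-- ===== PORT B =====
-- shape[0::2]
def adaptEvens : List Int → List Int
  | [] => []
  | [a] => [a]
  | a :: _ :: t => a :: adaptEvens t

-- shape[1::2]
def adaptOdds : List Int → List Int
  | [] => []
  | [_] => []
  | _ :: b :: t => b :: adaptOdds t

-- Source B's merge loop: append xs[i], and ys[i] while it exists (len xs ≥ len ys here)
def adaptMerge : List Int → List Int → List Int
  | [], _ => []
  | a :: as_, [] => a :: adaptMerge as_ []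
  | a :: as_, b :: bs => a :: b :: adaptMerge as_ bs

def adapt_coords_alt (x : Int) (y : Int) (side : Int) (shape : List Int) (flip_x : Bool) (flip_y : Bool) : List Int :=
  let polX : Int := if flip_x then -1 else 1
  let polY : Int := if flip_y then -1 else 1
  let x0 := (if flip_x then 13 * side else 0) + x + 1
  let y0 := (if flip_y then 13 * side else 0) + y + 1
  adaptMerge ((adaptEvens shape).map (fun c => c * side * polX + x0))
             ((adaptOdds shape).map (fun c => c * side * polY + y0))

-- ===== PRECONDITION & SPEC =====
def Spec_adapt_coords (x : Int) (y : Int) (side : Int) (shape : List Int) (flip_x : Bool) (flip_y : Bool) (out : List Int) : Prop := out = adapt_coords_alt x y side shape flip_x flip_y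
instance (x : Int) (y : Int) (side : Int) (shape : List Int) (flip_x : Bool) (flip_y : Bool) (out : List Int) : Decidable (Spec_adapt_coords x y side shape flip_x flip_y out) := by unfold Spec_adapt_coords; infer_instance

-- ===== CLAIM (what is proved, stated in full; the proofs are below) =====
def Claim_equal_adapt_coords : Prop := ∀ (x : Int) (y : Int) (side : Int) (shape : List Int) (flip_x : Bool) (flip_y : Bool), Dom_adapt_coords x y side shape flip_x flip_y → Spec_adapt_coords x y side shape flip_x flip_y (adapt_coords x y side shape flip_x flip_y)

-- ===== LEMMAS AND PROOFS =====

-- ===== VERDICT (by name: the statement is the Claim_ definition above) =====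
lemma adapt_key (side x0 y0 : Int) (fx fy : Bool) (l : List Int) :
    adaptGoA side x0 y0 fx fy true l =
      adaptMerge ((adaptEvens l).map (fun c => c * side * (if fx then -1 else 1) + x0))
                 ((adaptOdds l).map (fun c => c * side * (if fy then -1 else 1) + y0)) := by
  induction l using adaptEvens.induct with
  | case1 => simp [adaptGoA, adaptEvens, adaptOdds, adaptMerge]
  | case2 a => cases fx <;> simp [adaptGoA, adaptEvens, adaptOdds, adaptMerge]
  | case3 a b t ih =>
      cases fx <;> cases fy <;>
        simp [adaptGoA, adaptEvens, adaptOdds, adaptMerge, ih]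

theorem adapt_coords_spec : Claim_equal_adapt_coords := by
  intro x y side shape fx fy _
  unfold Spec_adapt_coords adapt_coords adapt_coords_alt
  cases fx <;> cases fy <;> simp [adapt_key]
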